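-- pv_equiv track=rewrite | github.com/athanase-matabaro/SRC-Research-Lab | scripts/leaderboard_update.py | aggregate_by_dataset
-- ===== SOURCE A (Python) =====
-- def aggregate_by_dataset(reports: list) -> dict:
--     """Aggregate reports by dataset and sort by CAQ."""
--     datasets = {}
--
--     for report in reports:
--         dataset = report["dataset"]
--         if dataset not in datasets:
--             datasets[dataset] = []
--         datasets[dataset].append(report)
--
--     # Sort each dataset by CAQ descending
--     for dataset in datasets:
--         datasets[dataset].sort(key=lambda x: x["computed_caq"], reverse=True)
--
--     return datasets
-- ===== SOURCE B (Python) =====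
-- def aggregate_by_dataset(reports: list) -> dict:
--     """Aggregate reports by dataset and sort by CAQ."""
--     datasets = {report["dataset"]: [] for report in reports}
--     for report in sorted(reports, key=lambda x: x["computed_caq"], reverse=True):
--         datasets[report["dataset"]].append(report)
--     return datasets
-- ===== Notes on version B (the rewrite author's own statement) =====
-- stated objective: alternative
-- what changed: B replaces A's group-then-sort-each-bucket with one global stable sort by CAQ descending followed by a single partitioning pass into buckets pre-created in first-appearance order; stability makes each bucket inherit the per-group sorted order.
import Mathlib
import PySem

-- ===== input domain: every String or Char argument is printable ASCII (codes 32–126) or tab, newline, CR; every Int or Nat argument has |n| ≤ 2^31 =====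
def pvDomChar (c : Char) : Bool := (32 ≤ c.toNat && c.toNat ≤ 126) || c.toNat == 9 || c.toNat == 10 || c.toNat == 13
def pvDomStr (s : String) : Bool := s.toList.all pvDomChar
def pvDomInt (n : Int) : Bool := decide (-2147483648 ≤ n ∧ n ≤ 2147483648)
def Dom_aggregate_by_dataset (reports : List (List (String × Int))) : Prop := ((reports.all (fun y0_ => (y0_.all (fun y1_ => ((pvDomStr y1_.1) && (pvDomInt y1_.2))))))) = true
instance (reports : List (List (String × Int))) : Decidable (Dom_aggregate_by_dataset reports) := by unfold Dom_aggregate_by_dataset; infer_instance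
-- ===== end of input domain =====

-- B groups by one global stable sort (CAQ descending) and a single partitioning pass instead of
-- sorting each group separately; same return value (proved below).

-- ===== PORT A =====
-- report["dataset"] / report["computed_caq"]: first-match dict lookup; the default 0 is never
-- reached on inputs satisfying Pre_ (both keys present), which is exactly where A returns.
def pvKey (r : List (String × Int)) : Int := (PySem.Dict.mk r).getD "dataset" 0
def pvCaq (r : List (String × Int)) : Int := (PySem.Dict.mk r).getD "computed_caq" 0

-- one iteration of A's first loop (grouping)
def pvStepA (d : PySem.Dict Int (List (List (String × Int)))) (report : List (String × Int)) :
    PySem.Dict Int (List (List (String × Int))) :=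
  let dataset := pvKey report
  let d := if d.contains dataset then d else d.insert dataset []
  d.insert dataset (d.getD dataset [] ++ [report])

def aggregate_by_dataset (reports : List (List (String × Int))) : List (Int × List (List (String × Int))) :=
  let datasets := reports.foldl pvStepA PySem.Dict.empty
  -- second loop: sort each dataset's list in place by CAQ descending (key order unchanged)
  datasets.items.map (fun p => (p.1, PySem.List.sorted p.2 pvCaq true))

-- ===== PORT B =====
def aggregate_by_dataset_alt (reports : List (List (String × Int))) : List (Int × List (List (String × Int))) :=
  -- {report["dataset"]: [] for report in reports}
  let datasets := reports.foldl (fun d report => d.insert (pvKey report) []) PySem.Dict.empty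
  -- for report in sorted(reports, key=..., reverse=True): datasets[report["dataset"]].append(report)
  let datasets := (PySem.List.sorted reports pvCaq true).foldl
      (fun d report => d.modify (pvKey report) [] (fun v => v ++ [report])) datasets
  datasets.items

-- ===== PRECONDITION & SPEC =====
-- Pre_ excludes exactly the inputs on which the Python A raises KeyError: a report missing the
-- "dataset" key (first loop) or the "computed_caq" key (the sort's key function).
def Pre_aggregate_by_dataset (reports : List (List (String × Int))) : Prop :=
  (reports.all (fun r => (PySem.Dict.mk r).contains "dataset" && (PySem.Dict.mk r).contains "computed_caq")) = true
instance (reports : List (List (String × Int))) : Decidable (Pre_aggregate_by_dataset reports) := by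
  unfold Pre_aggregate_by_dataset; infer_instance

def pvWitness_aggregate_by_dataset : (List (List (String × Int))) :=
  [[("dataset", 1), ("computed_caq", 5)], [("dataset", 1), ("computed_caq", 7)], [("dataset", 2), ("computed_caq", 0)]]

def Spec_aggregate_by_dataset (reports : List (List (String × Int))) (out : List (Int × List (List (String × Int)))) : Prop := out = aggregate_by_dataset_alt reports
instance (reports : List (List (String × Int))) (out : List (Int × List (List (String × Int)))) : Decidable (Spec_aggregate_by_dataset reports out) := by unfold Spec_aggregate_by_dataset; infer_instance

-- ===== CLAIM (what is proved, stated in full; the proofs are below) =====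
def Claim_equal_aggregate_by_dataset : Prop := ∀ (reports : List (List (String × Int))), Dom_aggregate_by_dataset reports → Pre_aggregate_by_dataset reports → Spec_aggregate_by_dataset reports (aggregate_by_dataset reports)

-- ===== LEMMAS AND PROOFS =====

-- A's grouping step is a modify (append to the bucket, creating it when absent)
theorem pvStepA_eq (d : PySem.Dict Int (List (List (String × Int)))) (r : List (String × Int)) :
    pvStepA d r = d.modify (pvKey r) [] (fun v => v ++ [r]) := by
  unfold pvStepA PySem.Dict.modify
  by_cases h : d.contains (pvKey r) = true
  · simp [h]
  · simp only [Bool.not_eq_true] at h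
    simp [h, PySem.Dict.getD_insert_self, PySem.Dict.insert_insert_self,
      PySem.Dict.getD_of_not_contains d [] h]

-- if x should go before every element of l, insertBy prepends it
theorem insertBy_of_forall_before {α : Type} (before : α → α → Bool) (x : α) (l : List α)
    (h : ∀ z ∈ l, before x z = true) : PySem.List.insertBy before x l = x :: l := by
  cases l with
  | nil => rfl
  | cons y t => simp [PySem.List.insertBy, h y (by simp)]

theorem filter_insertBy_pos {α : Type} (before : α → α → Bool) (p : α → Bool) (x : α) (l : List α)
    (hx : p x = true) (h : l.Pairwise (fun a b => before x a = true → before x b = true)) :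
    (PySem.List.insertBy before x l).filter p = PySem.List.insertBy before x (l.filter p) := by
  induction l with
  | nil => simp [PySem.List.insertBy, hx]
  | cons y t ih =>
    rcases List.pairwise_cons.mp h with ⟨hy, ht⟩
    by_cases hby : before x y = true
    · cases hpy : p y with
      | true => simp [PySem.List.insertBy, hby, hx, hpy]
      | false =>
        simp only [PySem.List.insertBy, hby, if_true, List.filter_cons, hpy, hx]
        simp only [Bool.false_eq_true, if_false]
        rw [insertBy_of_forall_before]
        intro z hz
        exact hy z (List.mem_of_mem_filter hz) hby
    · simp only [Bool.not_eq_true] at hby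
      cases hpy : p y with
      | true => simp [PySem.List.insertBy, hby, hpy, ih ht]
      | false => simp [PySem.List.insertBy, hby, hpy, ih ht]

theorem filter_insertBy_neg {α : Type} (before : α → α → Bool) (p : α → Bool) (x : α) (l : List α)
    (hx : p x = false) : (PySem.List.insertBy before x l).filter p = l.filter p := by
  induction l with
  | nil => simp [PySem.List.insertBy, hx]
  | cons y t ih =>
    by_cases hby : before x y = true
    · simp [PySem.List.insertBy, hby, hx]
    · simp only [Bool.not_eq_true] at hby
      simp [PySem.List.insertBy, hby, List.filter_cons, ih]

theorem sorted_rev_append_singleton {α κ : Type} [LinearOrder κ] (key : α → κ) (l : List α) (x : α) :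
    PySem.List.sorted (l ++ [x]) key true
      = PySem.List.insertBy (fun a b => decide (key b < key a)) x (PySem.List.sorted l key true) := by
  rw [PySem.List.sorted_rev_eq_foldl_insertBy, PySem.List.sorted_rev_eq_foldl_insertBy,
    List.foldl_append]
  rfl

-- stable sort commutes with filter
theorem filter_sorted_rev {α κ : Type} [LinearOrder κ] (key : α → κ) (p : α → Bool) (l : List α) :
    (PySem.List.sorted l key true).filter p = PySem.List.sorted (l.filter p) key true := by
  induction l using List.reverseRecOn with
  | nil => rfl
  | append_singleton l x ih =>
    rw [sorted_rev_append_singleton, List.filter_append]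
    cases hx : p x with
    | true =>
      rw [filter_insertBy_pos _ p x _ hx
        ((PySem.List.sorted_pairwise_rev l key).imp (by
          intro a b hba h1
          simp only [decide_eq_true_eq] at *
          exact lt_of_le_of_lt hba h1))]
      rw [ih, List.filter_cons, hx, ← sorted_rev_append_singleton]
      rfl
    | false =>
      rw [filter_insertBy_neg _ p x _ hx, ih, List.filter_cons, hx]
      simp

-- the grouping fold, characterized: value at k is the subsequence of reports with key k
theorem getD_group_fold (l : List (List (String × Int))) (d : PySem.Dict Int (List (List (String × Int)))) (k : Int) :
    (l.foldl (fun d r => d.modify (pvKey r) [] (fun v => v ++ [r])) d).getD k []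
      = d.getD k [] ++ l.filter (fun r => pvKey r == k) := by
  have h := PySem.Dict.getD_foldl_modify_append (l.map (fun r => (pvKey r, r))) d k
  rw [List.foldl_map] at h
  simp only at h
  rw [h, List.filter_map, List.map_map]
  simp [Function.comp_def]

-- the dict-comprehension fold: every value is []
theorem getD_empty_fold (l : List (List (String × Int))) :
    ∀ (d : PySem.Dict Int (List (List (String × Int)))), (∀ k, d.getD k [] = []) →
      ∀ k, (l.foldl (fun d r => d.insert (pvKey r) []) d).getD k [] = [] := by
  induction l with
  | nil => intro d h k; exact h k
  | cons r t ih =>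
    intro d h k
    refine ih _ (fun k' => ?_) k
    rw [PySem.Dict.getD_insert]
    split <;> [rfl; exact h k']

theorem set_update_of_subset {α : Type} [BEq α] [LawfulBEq α] (xs : List α) :
    ∀ (s : PySem.Set α), (∀ x ∈ xs, x ∈ s) → PySem.Set.update s xs = s := by
  induction xs with
  | nil => intro s _; rfl
  | cons x t ih =>
    intro s h
    show PySem.Set.update (PySem.Set.add s x) t = s
    rw [PySem.Set.add_of_mem (h x (by simp))]
    exact ih s (fun y hy => h y (by simp [hy]))

-- A, in closed form
theorem aggregate_by_dataset_eq (reports : List (List (String × Int))) :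
    aggregate_by_dataset reports
      = (PySem.Set.ofList (reports.map pvKey)).map
          (fun k => (k, PySem.List.sorted (reports.filter (fun r => pvKey r == k)) pvCaq true)) := by
  unfold aggregate_by_dataset
  show (reports.foldl pvStepA PySem.Dict.empty).items.map
      (fun p => (p.1, PySem.List.sorted p.2 pvCaq true)) = _
  rw [show pvStepA = (fun d r => d.modify (pvKey r) [] (fun v => v ++ [r])) from
    funext fun d => funext fun r => pvStepA_eq d r]
  have hnd : (reports.foldl (fun d r => d.modify (pvKey r) [] (fun v => v ++ [r]))
      PySem.Dict.empty).keys.Nodup :=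
    PySem.Dict.nodup_keys_foldl_modify_key reports pvKey [] (fun _ r => fun v => v ++ [r]) _
      PySem.Dict.nodup_keys_empty
  rw [PySem.Dict.items_eq_map_keys _ hnd []]
  rw [PySem.Dict.keys_foldl_modify_key reports pvKey [] (fun _ r => fun v => v ++ [r])]
  simp only [PySem.Dict.keys_empty, PySem.Set.update_nil_left, List.map_map]
  refine List.map_congr_left (fun k _ => ?_)
  simp only [Function.comp_def, getD_group_fold, PySem.Dict.getD_empty, List.nil_append]

-- B, in closed form
theorem aggregate_by_dataset_alt_eq (reports : List (List (String × Int))) :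
    aggregate_by_dataset_alt reports
      = (PySem.Set.ofList (reports.map pvKey)).map
          (fun k => (k, (PySem.List.sorted reports pvCaq true).filter (fun r => pvKey r == k))) := by
  unfold aggregate_by_dataset_alt
  show ((PySem.List.sorted reports pvCaq true).foldl
      (fun d r => d.modify (pvKey r) [] (fun v => v ++ [r]))
      (reports.foldl (fun d r => d.insert (pvKey r) []) PySem.Dict.empty)).items = _
  have hkeys0 : (reports.foldl (fun d r => d.insert (pvKey r) ([] : List (List (String × Int)))) PySem.Dict.empty).keys
      = PySem.Set.ofList (reports.map pvKey) := by
    rw [PySem.Dict.keys_foldl_insert_key reports pvKey (fun _ _ => [])]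
    simp [PySem.Set.update_nil_left]
  have hnd0 : (reports.foldl (fun d r => d.insert (pvKey r) ([] : List (List (String × Int)))) PySem.Dict.empty).keys.Nodup :=
    PySem.Dict.nodup_keys_foldl_insert_key reports pvKey (fun _ _ => []) _
      PySem.Dict.nodup_keys_empty
  have hnd : ((PySem.List.sorted reports pvCaq true).foldl
      (fun d r => d.modify (pvKey r) [] (fun v => v ++ [r]))
      (reports.foldl (fun d r => d.insert (pvKey r) []) PySem.Dict.empty)).keys.Nodup :=
    PySem.Dict.nodup_keys_foldl_modify_key _ pvKey [] (fun _ r => fun v => v ++ [r]) _ hnd0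
  rw [PySem.Dict.items_eq_map_keys _ hnd []]
  rw [PySem.Dict.keys_foldl_modify_key _ pvKey [] (fun _ r => fun v => v ++ [r]), hkeys0]
  rw [set_update_of_subset _ _ (by
    intro x hx
    rcases List.mem_map.mp hx with ⟨r, hr, rfl⟩
    exact (PySem.Set.mem_ofList _ _).mpr
      (List.mem_map_of_mem ((PySem.List.mem_sorted reports pvCaq true r).mp hr)))]
  refine List.map_congr_left (fun k _ => ?_)
  rw [getD_group_fold, getD_empty_fold reports _ (fun k => PySem.Dict.getD_empty k []) k,
    List.nil_append]

-- ===== VERDICT (by name: the statement is the Claim_ definition above) =====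
theorem aggregate_by_dataset_spec : Claim_equal_aggregate_by_dataset := by
  intro reports _ _
  show aggregate_by_dataset reports = aggregate_by_dataset_alt reports
  rw [aggregate_by_dataset_eq, aggregate_by_dataset_alt_eq]
  refine List.map_congr_left (fun k _ => ?_)
  rw [filter_sorted_rev]
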